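-- pv_equiv track=rewrite | github.com/lantel-wm/mina | agent_service/src/mina_agent/knowledge/service.py | _dataset_root_index
-- ===== SOURCE A (Python) =====
-- def _dataset_root_index(parts: tuple[str, ...] | list[str], dataset_segments: set[str]) -> int | None:
--     candidates = [index for index, part in enumerate(parts) if part == "data"]
--     for data_index in reversed(candidates):
--         if data_index + 2 >= len(parts):
--             continue
--         if any(parts[index] in dataset_segments for index in range(data_index + 2, len(parts))):
--             return data_index
--     return None
-- ===== SOURCE B (Python) =====
-- def _dataset_root_index(parts: tuple[str, ...] | list[str], dataset_segments: set[str]) -> int | None: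
--     # One backward pass: s1/s2 are "some part at a strictly later index
--     # (resp. at index >= current+2) is a dataset segment".
--     s1 = False
--     s2 = False
--     for index, part in reversed(list(enumerate(parts))):
--         if part == "data" and s2:
--             return index
--         s2, s1 = s1, s1 or (part in dataset_segments)
--     return None
-- ===== Notes on version B (the rewrite author's own statement) =====
-- stated objective: alternative
-- what changed: Replaces the candidate list plus a fresh suffix scan per 'data' index with one backward pass that maintains two suffix booleans and returns at the first qualifying 'data' index.
import Mathlib
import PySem

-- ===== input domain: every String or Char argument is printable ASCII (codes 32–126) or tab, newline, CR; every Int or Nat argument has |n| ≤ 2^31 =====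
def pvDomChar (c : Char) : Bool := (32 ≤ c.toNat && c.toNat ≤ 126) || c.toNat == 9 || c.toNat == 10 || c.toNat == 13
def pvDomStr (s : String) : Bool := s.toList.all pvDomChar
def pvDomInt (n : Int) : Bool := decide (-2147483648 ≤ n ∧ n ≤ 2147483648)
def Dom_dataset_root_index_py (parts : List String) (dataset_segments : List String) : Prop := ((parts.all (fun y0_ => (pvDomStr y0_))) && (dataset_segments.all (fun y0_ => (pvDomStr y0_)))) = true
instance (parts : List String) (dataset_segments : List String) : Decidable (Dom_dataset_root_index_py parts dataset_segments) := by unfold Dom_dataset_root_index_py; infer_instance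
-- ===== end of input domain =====

-- B: one backward pass maintaining two suffix booleans, instead of A's candidate list with a fresh suffix scan per 'data' index (objective: alternative).

-- ===== PORT A =====
-- any(parts[index] in dataset_segments for index in range(data_index + 2, len(parts)))
-- (pyGetD with default "" is exact here: every index produced by the range is in bounds)
def pvACond (parts ds : List String) (i : Int) : Bool :=
  (PySem.List.pyRange (i + 2) (parts.length : Int) 1).any
    (fun j => ds.contains (PySem.List.pyGetD parts j ""))

-- the 'for data_index in reversed(candidates)' loop
def pvALoop (parts ds : List String) : List Int → Option Int
  | [] => none
  | i :: rest =>
      if (parts.length : Int) ≤ i + 2 then pvALoop parts ds rest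
      else if pvACond parts ds i then some i
      else pvALoop parts ds rest

def dataset_root_index_py (parts : List String) (dataset_segments : List String) : Option Int :=
  let candidates :=
    ((PySem.List.enumerate parts 0).filter (fun p => p.2 == "data")).map (fun p => p.1)
  pvALoop parts dataset_segments candidates.reverse

-- ===== PORT B =====
-- the 'for index, part in reversed(list(enumerate(parts)))' loop with state (s1, s2)
def pvBLoop (ds : List String) : List (Int × String) → Bool → Bool → Option Int
  | [], _, _ => none
  | (i, p) :: rest, s1, s2 =>
      if p == "data" && s2 then some i
      else pvBLoop ds rest (s1 || ds.contains p) s1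

def dataset_root_index_py_alt (parts : List String) (dataset_segments : List String) : Option Int :=
  pvBLoop dataset_segments (PySem.List.enumerate parts 0).reverse false false

-- ===== PRECONDITION & SPEC =====
def Spec_dataset_root_index_py (parts : List String) (dataset_segments : List String) (out : Option Int) : Prop := out = dataset_root_index_py_alt parts dataset_segments
instance (parts : List String) (dataset_segments : List String) (out : Option Int) : Decidable (Spec_dataset_root_index_py parts dataset_segments out) := by unfold Spec_dataset_root_index_py; infer_instance

-- ===== CLAIM (what is proved, stated in full; the proofs are below) =====
def Claim_equal_dataset_root_index_py : Prop := ∀ (parts : List String) (dataset_segments : List String), Dom_dataset_root_index_py parts dataset_segments → Spec_dataset_root_index_py parts dataset_segments (dataset_root_index_py parts dataset_segments)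

-- ===== LEMMAS AND PROOFS =====

-- reference value: the largest index i < k with parts[i] = "data" and a dataset segment at some index ≥ i + 2
def pvBest (parts ds : List String) : Nat → Option Int
  | 0 => none
  | k + 1 =>
      if (parts.getD k "" == "data") && (parts.drop (k + 2)).any (fun s => ds.contains s)
      then some (k : Int) else pvBest parts ds k

lemma pvACond_eq (parts ds : List String) (k : Nat) :
    pvACond parts ds (k : Int) = (parts.drop (k + 2)).any (fun s => ds.contains s) := by
  unfold pvACond
  have h0 : (0 : Int) ≤ ((k + 2 : Nat) : Int) := by positivity
  have hm := PySem.List.map_pyGetD_pyRange parts "" (a := ((k + 2 : Nat) : Int)) h0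
  rw [Int.toNat_natCast] at hm
  rw [show ((k : Int) + 2) = ((k + 2 : Nat) : Int) by push_cast; ring, ← hm, List.any_map]
  rfl

lemma pvALoop_take (parts ds : List String) (k : Nat) (hk : k ≤ parts.length) :
    pvALoop parts ds
      ((((PySem.List.enumerate (parts.take k) 0).filter (fun p => p.2 == "data")).map (fun p => p.1)).reverse)
      = pvBest parts ds k := by
  induction k with
  | zero => simp [pvALoop, pvBest]
  | succ k ih =>
    have hk' : k < parts.length := hk
    rw [List.take_add_one, List.getElem?_eq_getElem hk']
    simp only [Option.toList_some, PySem.List.enumerate_append, List.filter_append,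
      List.map_append, List.reverse_append]
    have hlen : (parts.take k).length = k := List.length_take_of_le (le_of_lt hk')
    rw [hlen]
    by_cases hd : parts[k] == "data"
    · have hfil : (PySem.List.enumerate [parts[k]] ((0 : Int) + (k : Nat))).filter
          (fun p => p.2 == "data") = [((k : Int), parts[k])] := by
        simp [PySem.List.enumerate, hd]
      rw [hfil]
      simp only [List.map_cons, List.map_nil, List.reverse_cons, List.reverse_nil,
        List.nil_append, List.cons_append]
      show pvALoop parts ds ((k : Int) :: _) = _
      unfold pvALoop
      rw [pvACond_eq]
      unfold pvBest
      rw [List.getD_eq_getElem parts "" hk', hd, Bool.true_and]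
      by_cases hb : (parts.length : Int) ≤ (k : Int) + 2
      · have hnil : parts.drop (k + 2) = [] := List.drop_eq_nil_of_le (by omega)
        simp [hb, hnil, ih (le_of_lt hk')]
      · simp only [hb, if_false]
        by_cases ha : (parts.drop (k + 2)).any (fun s => ds.contains s)
        · rw [if_pos ha, if_pos ha]
        · simp [ih (le_of_lt hk')]
    · have hfil : (PySem.List.enumerate [parts[k]] ((0 : Int) + (k : Nat))).filter
          (fun p => p.2 == "data") = [] := by
        simp [PySem.List.enumerate, hd]
      rw [hfil]
      simp only [List.map_nil, List.reverse_nil, List.nil_append]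
      unfold pvBest
      rw [List.getD_eq_getElem parts "" hk']
      rw [if_neg (by simp [hd])]
      exact ih (le_of_lt hk')

lemma pvBLoop_take (parts ds : List String) (k : Nat) (hk : k ≤ parts.length) :
    pvBLoop ds ((PySem.List.enumerate (parts.take k) 0).reverse)
      ((parts.drop k).any (fun s => ds.contains s))
      ((parts.drop (k + 1)).any (fun s => ds.contains s))
      = pvBest parts ds k := by
  induction k with
  | zero => simp [pvBLoop, pvBest]
  | succ k ih =>
    have hk' : k < parts.length := hk
    rw [List.take_add_one, List.getElem?_eq_getElem hk']
    simp only [Option.toList_some, PySem.List.enumerate_append, List.reverse_append]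
    have hlen : (parts.take k).length = k := List.length_take_of_le (le_of_lt hk')
    rw [hlen]
    have henum : PySem.List.enumerate [parts[k]] ((0 : Int) + (k : Nat)) = [((k : Int), parts[k])] := by
      simp [PySem.List.enumerate]
    rw [henum]
    simp only [List.reverse_cons, List.reverse_nil, List.nil_append, List.cons_append]
    show pvBLoop ds (((k : Int), parts[k]) :: _) _ _ = _
    unfold pvBLoop pvBest
    rw [List.getD_eq_getElem parts "" hk']
    have hdrop : parts.drop k = parts[k] :: parts.drop (k + 1) :=
      List.drop_eq_getElem_cons hk'
    by_cases hc : (parts[k] == "data") && (parts.drop (k + 2)).any (fun s => ds.contains s)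
    · rw [if_pos hc, if_pos hc]
    · rw [if_neg hc, if_neg hc, ← ih (le_of_lt hk')]
      congr 1
      rw [hdrop, List.any_cons, Bool.or_comm]

-- ===== VERDICT (by name: the statement is the Claim_ definition above) =====
theorem dataset_root_index_py_spec : Claim_equal_dataset_root_index_py := by
  intro parts ds _
  unfold Spec_dataset_root_index_py dataset_root_index_py dataset_root_index_py_alt
  have hA := pvALoop_take parts ds parts.length le_rfl
  have hB := pvBLoop_take parts ds parts.length le_rfl
  rw [List.take_length] at hA hB
  rw [List.drop_length] at hB
  rw [List.drop_eq_nil_of_le (by omega)] at hB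
  simpa [hA] using hB.symm
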